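-- pv_equiv track=rewrite | github.com/kamcho/TSCSwap | chat/whatsapp_integration.py | is_greeting
-- ===== SOURCE A (Python) =====
-- def is_greeting(message: str) -> bool:
--     """Check if the message is a greeting."""
--     if not message:
--         return False
--
--     message_lower = message.lower().strip()
--     greetings = [
--         'hello', 'hi', 'hey', 'greetings', 'good morning', 'good afternoon',
--         'good evening', 'good night', 'morning', 'afternoon', 'evening',
--         'hey there', 'hi there', 'hello there', 'what\'s up', 'whats up',
--         'sup', 'yo', 'hola', 'namaste', 'salam', 'jambo'
--     ]
--
--     # Check if message starts with a greeting or is just a greeting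
--     for greeting in greetings:
--         if message_lower.startswith(greeting) or message_lower == greeting:
--             return True
--
--     return False
-- ===== SOURCE B (Python) =====
-- def is_greeting(message: str) -> bool:
--     """Check if the message is a greeting (starts with or is one)."""
--     if not message:
--         return False
--     s = message.lower().strip()
--     greetings = {
--         'hello', 'hi', 'hey', 'greetings', 'good morning', 'good afternoon',
--         'good evening', 'good night', 'morning', 'afternoon', 'evening',
--         'hey there', 'hi there', 'hello there', "what's up", 'whats up',
--         'sup', 'yo', 'hola', 'namaste', 'salam', 'jambo'
--     }
--     max_len = max(len(g) for g in greetings)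
--     return any(s[:k] in greetings for k in range(1, max_len + 1))
-- ===== Notes on version B (the rewrite author's own statement) =====
-- stated objective: alternative
-- what changed: Instead of scanning the 22 greetings and testing startswith for each, B takes each prefix length k from 1 to the longest greeting's length and tests membership of the message prefix s[:k] in a greeting set, so the per-greeting prefix scan is replaced by per-length set lookups.
import Mathlib
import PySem

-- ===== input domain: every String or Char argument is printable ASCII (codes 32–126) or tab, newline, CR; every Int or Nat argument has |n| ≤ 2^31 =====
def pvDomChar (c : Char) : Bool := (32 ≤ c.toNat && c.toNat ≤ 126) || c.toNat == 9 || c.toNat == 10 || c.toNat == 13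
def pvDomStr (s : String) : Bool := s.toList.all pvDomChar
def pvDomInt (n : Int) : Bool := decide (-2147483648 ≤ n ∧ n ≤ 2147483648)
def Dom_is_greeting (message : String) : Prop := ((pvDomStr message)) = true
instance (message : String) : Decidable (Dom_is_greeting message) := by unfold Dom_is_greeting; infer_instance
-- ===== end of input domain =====

-- B replaces A's per-greeting prefix-scanning loop by one pass over prefix LENGTHS with a set
-- membership test per prefix (objective: alternative decomposition, same behaviour).

-- ===== PORT A =====
def greetingsA : List String :=
  ["hello", "hi", "hey", "greetings", "good morning", "good afternoon",
   "good evening", "good night", "morning", "afternoon", "evening",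
   "hey there", "hi there", "hello there", "what's up", "whats up",
   "sup", "yo", "hola", "namaste", "salam", "jambo"]

-- the 'for greeting in greetings: if …: return True' loop, early return and all
def greetLoopA (s : String) : List String → Bool
  | [] => false
  | g :: rest =>
      if PySem.Str.startswith s g || s == g then true else greetLoopA s rest

def is_greeting (message : String) : Bool :=
  if message == "" then false
  else
    let messageLower := PySem.Str.strip (PySem.Str.lower message)
    greetLoopA messageLower greetingsA

-- ===== PORT B =====
def greetingSetB : PySem.Set String :=
  PySem.Set.ofList
    ["hello", "hi", "hey", "greetings", "good morning", "good afternoon",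
     "good evening", "good night", "morning", "afternoon", "evening",
     "hey there", "hi there", "hello there", "what's up", "whats up",
     "sup", "yo", "hola", "namaste", "salam", "jambo"]

def is_greeting_alt (message : String) : Bool :=
  if message == "" then false
  else
    let s := PySem.Str.strip (PySem.Str.lower message)
    -- max(len(g) for g in greetings); the set is a nonempty literal, so max() cannot raise
    let maxLen : Int := (PySem.List.max? (greetingSetB.map PySem.Str.len) id).getD 0
    (PySem.List.pyRange 1 (maxLen + 1) 1).any
      (fun k => PySem.Set.contains greetingSetB (PySem.Str.slice s none (some k)))

-- ===== PRECONDITION & SPEC =====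
def Spec_is_greeting (message : String) (out : Bool) : Prop := out = is_greeting_alt message
instance (message : String) (out : Bool) : Decidable (Spec_is_greeting message out) := by unfold Spec_is_greeting; infer_instance

-- ===== CLAIM (what is proved, stated in full; the proofs are below) =====
def Claim_equal_is_greeting : Prop := ∀ (message : String), Dom_is_greeting message → Spec_is_greeting message (is_greeting message)

-- ===== LEMMAS AND PROOFS =====

lemma greetLoopA_eq_any (s : String) (gs : List String) :
    greetLoopA s gs = gs.any (fun g => PySem.Str.startswith s g || s == g) := by
  induction gs with
  | nil => rfl
  | cons g rest ih =>
      by_cases hsg : s = g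
      · simp [greetLoopA, hsg]
      · have hb : (s == g) = false := beq_eq_false_iff_ne.mpr hsg
        simp [greetLoopA, ih, hb]

lemma greet_facts : ∀ g ∈ greetingsA,
    1 ≤ g.toList.length ∧ g.toList.length ≤ 14 ∧ PySem.Set.contains greetingSetB g = true := by
  decide

lemma greetingSetB_eq : greetingSetB = greetingsA := by decide

lemma maxLen_eq : (PySem.List.max? (greetingSetB.map PySem.Str.len) id).getD 0 = 14 := by decide

lemma key (s : String) :
    greetLoopA s greetingsA =
      (PySem.List.pyRange 1 15 1).any
        (fun k => PySem.Set.contains greetingSetB (PySem.Str.slice s none (some k))) := by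
  rw [greetLoopA_eq_any, Bool.eq_iff_iff]
  simp only [List.any_eq_true]
  constructor
  · rintro ⟨g, hg, h⟩
    have hpre : g.toList <+: s.toList := by
      rcases Bool.or_eq_true_iff.mp h with h | h
      · simpa using (PySem.Chars.startswith_iff s.toList g.toList).mp (by simpa using h)
      · have : s = g := by simpa using h
        simp [this]
    obtain ⟨h1, h14, hmem⟩ := greet_facts g hg
    refine ⟨(g.toList.length : Int), ?_, ?_⟩
    · rw [PySem.List.mem_pyRange_one]; omega
    · have hx : PySem.Str.slice s none (some (g.toList.length : Int)) = g := by
        apply String.ext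
        have := (List.prefix_iff_eq_take.mp hpre)
        simpa [PySem.List.slice_to_natCast] using this.symm
      rw [hx]; exact hmem
  · rintro ⟨k, hk, hc⟩
    rw [PySem.List.mem_pyRange_one] at hk
    set x := PySem.Str.slice s none (some k) with hxdef
    have hxl : x.toList = s.toList.take k.toNat := by
      simp only [hxdef, PySem.Str.toList_slice, PySem.Chars.slice_eq_listSlice]
      rw [PySem.List.slice_to _ (by omega : (0:Int) ≤ k)]
    refine ⟨x, ?_, ?_⟩
    · have : x ∈ greetingSetB := by
        simpa [PySem.Set.contains] using hc
      rwa [greetingSetB_eq] at this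
    · have : x.toList <+: s.toList := by rw [hxl]; exact List.take_prefix _ _
      have := (PySem.Chars.startswith_iff s.toList x.toList).mpr this
      simp [this]

-- ===== VERDICT (by name: the statement is the Claim_ definition above) =====
theorem is_greeting_spec : Claim_equal_is_greeting := by
  intro message _
  unfold Spec_is_greeting is_greeting is_greeting_alt
  split_ifs with h
  · rfl
  · simp only [maxLen_eq]
    exact key _
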